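-- pv_equiv track=rewrite | github.com/Aasthaengg/IBMdataset | Python_codes/p03032/s966956449.py | f
-- ===== SOURCE A (Python) =====
-- import heapq
--
-- def f(d,n):
--     a = list(d)
--     heapq.heapify(a)
--     while n > 0 and len(a) > 0:
--         tmp = heapq.heappop(a)
--         if tmp >= 0:
--             heapq.heappush(a,tmp)
--             break
--         n -= 1
--     return sum(a)
-- ===== SOURCE B (Python) =====
-- def f(d, n):
--     negs = sorted(x for x in d if x < 0)
--     k = min(max(n, 0), len(negs))
--     return sum(d) - sum(negs[:k])
-- ===== Notes on version B (the rewrite author's own statement) =====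
-- stated objective: faster
-- what changed: Replaces the heapify-then-pop loop with one pass: sort the negative elements once and subtract the sum of the k = min(n, #negatives) smallest of them from the total sum.
import Mathlib
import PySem

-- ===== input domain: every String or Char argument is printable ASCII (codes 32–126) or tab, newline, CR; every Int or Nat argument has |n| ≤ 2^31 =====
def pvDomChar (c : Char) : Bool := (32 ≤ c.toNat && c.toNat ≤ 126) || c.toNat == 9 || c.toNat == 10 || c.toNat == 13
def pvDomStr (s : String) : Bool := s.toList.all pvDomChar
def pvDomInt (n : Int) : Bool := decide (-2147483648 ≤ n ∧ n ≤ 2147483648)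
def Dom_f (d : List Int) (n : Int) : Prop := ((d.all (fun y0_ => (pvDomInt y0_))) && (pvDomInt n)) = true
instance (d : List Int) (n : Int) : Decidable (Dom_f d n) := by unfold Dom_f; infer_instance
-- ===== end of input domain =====

-- B replaces A's heapify-and-pop loop by: sort the negatives once and subtract the
-- k smallest from the total (measurably faster; exact same return value).

-- ===== PORT A =====
-- A's binary heap is modeled at the multiset level: heappop returns the minimum of the
-- pool and removes one occurrence of it (PySem.List.min? / List.erase). The popped values
-- and the final sum are exactly those of Python's heapq on every input, since heappop
-- always yields the minimum and only the remaining multiset's sum is returned.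
def fLoop (a : List Int) (n : Int) : List Int :=
  if n > 0 then
    match h : PySem.List.min? a (fun x => x) with
    | none => a                              -- len(a) == 0: loop exits
    | some tmp =>
      if tmp ≥ 0 then a                      -- push tmp back and break: pool unchanged
      else fLoop (a.erase tmp) (n - 1)
  else a
termination_by a.length
decreasing_by
  have := List.length_erase_of_mem (PySem.List.min?_mem h)
  have := List.length_pos_of_mem (PySem.List.min?_mem h)
  omega

def f (d : List Int) (n : Int) : Int := (fLoop d n).sum

-- ===== PORT B =====
def f_alt (d : List Int) (n : Int) : Int :=
  let negs := PySem.List.sorted (d.filter (fun x => decide (x < 0))) (fun x => x) false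
  let k : Int := min (max n 0) (negs.length : Int)
  d.sum - (PySem.List.slice negs none (some k)).sum

-- ===== PRECONDITION & SPEC =====
def Spec_f (d : List Int) (n : Int) (out : Int) : Prop := out = f_alt d n
instance (d : List Int) (n : Int) (out : Int) : Decidable (Spec_f d n out) := by unfold Spec_f; infer_instance

-- ===== CLAIM (what is proved, stated in full; the proofs are below) =====
def Claim_equal_f : Prop := ∀ (d : List Int) (n : Int), Dom_f d n → Spec_f d n (f d n)

-- ===== LEMMAS AND PROOFS =====

theorem sorted_id_cons_min {m : Int} {xs : List Int}
    (hmin : ∀ y ∈ xs, m ≤ y) :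
    PySem.List.sorted (m :: xs) (fun x => x) false
      = m :: PySem.List.sorted xs (fun x => x) false := by
  apply PySem.List.sorted_id_eq_of_perm_of_pairwise
  · exact (PySem.List.sorted_perm xs (fun x => x) false).cons m
  · refine List.pairwise_cons.mpr ⟨?_, PySem.List.sorted_pairwise xs (fun x => x)⟩
    intro y hy
    exact hmin y ((PySem.List.mem_sorted _ _ _ _).mp hy)

theorem fLoop_sum (a : List Int) (n : Int) :
    (fLoop a n).sum =
      a.sum -
        ((PySem.List.sorted (a.filter (fun x => decide (x < 0))) (fun x => x) false).take
          (min (max n 0) ((a.filter (fun x => decide (x < 0))).length : Int)).toNat).sum := by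
  by_cases hn : n > 0
  · rw [fLoop, if_pos hn]
    split
    · rename_i h
      have ha : a = [] := (PySem.List.min?_eq_none_iff _ _).mp h
      subst ha; simp [PySem.List.sorted]
    · rename_i m h
      have hmem : m ∈ a := PySem.List.min?_mem h
      have hmin : ∀ y ∈ a, m ≤ y := by
        intro y hy; simpa using PySem.List.min?_isMin h y hy
      by_cases hm : m ≥ 0
      · -- no negatives in a: the filter is empty
        rw [if_pos hm]
        have hfe : a.filter (fun x => decide (x < 0)) = [] := by
          rw [List.filter_eq_nil_iff]
          intro y hy
          simp only [decide_eq_true_eq, not_lt]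
          exact le_trans hm (hmin y hy)
        simp [hfe, PySem.List.sorted]
      · rw [if_neg hm]
        have hrec := fLoop_sum (a.erase m) (n - 1)
        rw [hrec]
        have hmneg : m < 0 := lt_of_not_ge hm
        -- filter of a is (perm) m :: filter of (a.erase m)
        have hperm : a.Perm (m :: a.erase m) := List.perm_cons_erase hmem
        have hpf : (a.filter (fun x => decide (x < 0))).Perm
            (m :: (a.erase m).filter (fun x => decide (x < 0))) := by
          have := hperm.filter (fun x => decide (x < 0))
          simpa [hmneg] using this
        have hsorteq : PySem.List.sorted (a.filter (fun x => decide (x < 0))) (fun x => x) false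
            = m :: PySem.List.sorted ((a.erase m).filter (fun x => decide (x < 0))) (fun x => x) false := by
          rw [PySem.List.sorted_eq_sorted_of_perm _ _ _ (fun x y h => h) hpf]
          apply sorted_id_cons_min
          intro y hy
          exact hmin y (List.mem_of_mem_erase (List.mem_of_mem_filter hy))
        have hsum : a.sum = m + (a.erase m).sum := by
          calc a.sum = (m :: a.erase m).sum := hperm.sum_eq
            _ = m + (a.erase m).sum := by simp
        have hlen : (a.filter (fun x => decide (x < 0))).length
            = ((a.erase m).filter (fun x => decide (x < 0))).length + 1 := by
          simpa using hpf.length_eq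
        set L := ((a.erase m).filter (fun x => decide (x < 0))).length with hL
        have hk : (min (max n 0) ((a.filter (fun x => decide (x < 0))).length : Int)).toNat
            = (min (max (n - 1) 0) ((L : Int))).toNat + 1 := by
          rw [hlen]; omega
        rw [hsorteq, hk, List.take_succ_cons, List.sum_cons, hsum]
        ring
  · rw [fLoop, if_neg hn]
    have : (min (max n 0) ((a.filter (fun x => decide (x < 0))).length : Int)).toNat = 0 := by
      omega
    simp [this]
termination_by a.length
decreasing_by
  have := List.length_erase_of_mem hmem
  have := List.length_pos_of_mem hmem
  omega

theorem slice_to_take (xs : List Int) (k : Int) (hk : 0 ≤ k) :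
    PySem.List.slice xs none (some k) = xs.take k.toNat :=
  PySem.List.slice_to xs hk

-- ===== VERDICT (by name: the statement is the Claim_ definition above) =====
theorem f_spec : Claim_equal_f := by
  intro d n _
  show f d n = f_alt d n
  simp only [f, f_alt]
  rw [fLoop_sum, slice_to_take _ _ (by omega), PySem.List.length_sorted]
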